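-- pv_equiv track=rewrite | github.com/Austin-Daigle/CodeCheck-2.0-Python-Research | Update-4-10-2023/CodeCheck 2.0 Research.py | findTokens
-- ===== SOURCE A (Python) =====
-- def findTokens(inputA, inputB,isCaseSensative):
--     if isCaseSensative:
--         inputA = inputA.lower()
--         inputB = inputB.lower()
--     identifiedTokens = []
--     for x in range(len(inputA)):
--         for y in range(x+1,len(inputA)+1):
--             subString = inputA[x:y]
--             if subString in inputB:
--                 identifiedTokens.append(subString)
--
--     return list(identifiedTokens)
-- ===== SOURCE B (Python) =====
-- def findTokens(inputA, inputB, isCaseSensative):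
--     if isCaseSensative:
--         inputA = inputA.lower()
--         inputB = inputB.lower()
--     tokens = []
--     n = len(inputA)
--     for x in range(n):
--         # extend y until the substring first fails: any longer substring from x
--         # has the failing one as a prefix, so it cannot occur in inputB either.
--         y = x + 1
--         while y <= n and inputA[x:y] in inputB:
--             tokens.append(inputA[x:y])
--             y += 1
--     return tokens
-- ===== Notes on version B (the rewrite author's own statement) =====
-- stated objective: faster
-- what changed: B replaces A's exhaustive scan over all O(n^2) substrings with an early-break extension per start position: once inputA[x:y] is absent from inputB, every longer substring from x has it as a prefix and is absent too, so B stops extending immediately.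
import Mathlib
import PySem

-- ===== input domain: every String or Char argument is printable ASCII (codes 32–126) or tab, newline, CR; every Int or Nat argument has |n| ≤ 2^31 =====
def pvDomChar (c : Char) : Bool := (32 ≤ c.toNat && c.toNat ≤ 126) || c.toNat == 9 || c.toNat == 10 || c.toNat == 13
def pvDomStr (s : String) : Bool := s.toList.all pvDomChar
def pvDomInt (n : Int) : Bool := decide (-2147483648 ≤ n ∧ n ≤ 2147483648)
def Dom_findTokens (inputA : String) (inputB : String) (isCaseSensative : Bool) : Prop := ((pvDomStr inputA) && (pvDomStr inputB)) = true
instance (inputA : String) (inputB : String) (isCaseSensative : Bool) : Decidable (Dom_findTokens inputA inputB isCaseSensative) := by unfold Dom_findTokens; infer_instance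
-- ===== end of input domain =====

-- B stops extending a start position at the first substring absent from inputB
-- (any longer substring has it as a prefix, so it is absent too): faster, same output.

-- ===== PORT A =====
-- literal port: for every start x, try EVERY end y and test membership
def findTokens (inputA : String) (inputB : String) (isCaseSensative : Bool) : List String :=
  let a := if isCaseSensative then PySem.Str.lower inputA else inputA
  let b := if isCaseSensative then PySem.Str.lower inputB else inputB
  (PySem.List.pyRange 0 (PySem.Str.len a) 1).foldl (fun acc x =>
    (PySem.List.pyRange (x + 1) (PySem.Str.len a + 1) 1).foldl (fun acc2 y =>
      if PySem.Str.isIn (PySem.Str.slice a (some x) (some y)) b then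
        acc2 ++ [PySem.Str.slice a (some x) (some y)]
      else acc2) acc) []

-- ===== PORT B =====
-- the 'while y <= n and inputA[x:y] in inputB' loop of Source B
def ftExtend (a : String) (b : String) (x : Int) (y : Int) : List String :=
  if _h : y ≤ PySem.Str.len a then
    if PySem.Str.isIn (PySem.Str.slice a (some x) (some y)) b then
      PySem.Str.slice a (some x) (some y) :: ftExtend a b x (y + 1)
    else []
  else []
termination_by (PySem.Str.len a + 1 - y).toNat
decreasing_by omega

def findTokens_alt (inputA : String) (inputB : String) (isCaseSensative : Bool) : List String :=
  let a := if isCaseSensative then PySem.Str.lower inputA else inputA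
  let b := if isCaseSensative then PySem.Str.lower inputB else inputB
  (PySem.List.pyRange 0 (PySem.Str.len a) 1).foldl (fun acc x => acc ++ ftExtend a b x (x + 1)) []

-- ===== PRECONDITION & SPEC =====
def Spec_findTokens (inputA : String) (inputB : String) (isCaseSensative : Bool) (out : List String) : Prop := out = findTokens_alt inputA inputB isCaseSensative
instance (inputA : String) (inputB : String) (isCaseSensative : Bool) (out : List String) : Decidable (Spec_findTokens inputA inputB isCaseSensative out) := by unfold Spec_findTokens; infer_instance

-- ===== CLAIM (what is proved, stated in full; the proofs are below) =====
def Claim_equal_findTokens : Prop := ∀ (inputA : String) (inputB : String) (isCaseSensative : Bool), Dom_findTokens inputA inputB isCaseSensative → Spec_findTokens inputA inputB isCaseSensative (findTokens inputA inputB isCaseSensative)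

-- ===== LEMMAS AND PROOFS =====

-- if a[x:y] is not in b then no longer substring a[x:y'] is (prefix monotonicity)
lemma slice_isIn_mono (a b : String) (x y y' : Int) (hx : 0 ≤ x) (hxy : x ≤ y) (hyy : y ≤ y')
    (h : PySem.Str.isIn (PySem.Str.slice a (some x) (some y)) b = false) :
    PySem.Str.isIn (PySem.Str.slice a (some x) (some y')) b = false := by
  rw [PySem.Str.isIn_eq, PySem.Str.toList_slice, PySem.Chars.slice_eq_listSlice] at h ⊢
  rw [PySem.List.slice_toNat _ hx (by omega : (0:Int) ≤ y)] at h
  rw [PySem.List.slice_toNat _ hx (by omega : (0:Int) ≤ y')]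
  rw [PySem.Chars.isIn_eq_false_iff] at h ⊢
  intro hin
  exact h ((List.take_prefix_take_left (by omega : y.toNat - x.toNat ≤ y'.toNat - x.toNat)).isInfix.trans hin)

-- once a[x:y0] fails, the rest of A's inner loop appends nothing
lemma fold_dead (a b : String) (x y0 : Int) (hx : 0 ≤ x) (hxy : x ≤ y0)
    (h : PySem.Str.isIn (PySem.Str.slice a (some x) (some y0)) b = false) :
    ∀ (k : Nat) (z : Int) (acc : List String), (PySem.Str.len a + 1 - z).toNat = k → y0 ≤ z →
      (PySem.List.pyRange z (PySem.Str.len a + 1) 1).foldl (fun acc2 y =>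
        if PySem.Str.isIn (PySem.Str.slice a (some x) (some y)) b then
          acc2 ++ [PySem.Str.slice a (some x) (some y)]
        else acc2) acc = acc := by
  intro k
  induction k with
  | zero =>
    intro z acc hk _
    rw [PySem.List.pyRange_one_eq_nil (by omega)]
    rfl
  | succ k ih =>
    intro z acc hk hz
    rw [PySem.List.pyRange_one_cons (by omega)]
    simp only [List.foldl_cons]
    rw [if_neg (by rw [slice_isIn_mono a b x y0 z hx hxy hz h]; simp)]
    exact ih (z + 1) acc (by omega) (by omega)

-- A's inner loop over y ∈ [y, n+1) equals acc ++ (B's early-break extension from y)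
lemma inner_eq (a b : String) (x : Int) (hx : 0 ≤ x) :
    ∀ (k : Nat) (y : Int) (acc : List String), (PySem.Str.len a + 1 - y).toNat = k → x < y →
      (PySem.List.pyRange y (PySem.Str.len a + 1) 1).foldl (fun acc2 z =>
        if PySem.Str.isIn (PySem.Str.slice a (some x) (some z)) b then
          acc2 ++ [PySem.Str.slice a (some x) (some z)]
        else acc2) acc = acc ++ ftExtend a b x y := by
  intro k
  induction k with
  | zero =>
    intro y acc hk hxy
    rw [PySem.List.pyRange_one_eq_nil (by omega), ftExtend, dif_neg (by omega : ¬ y ≤ PySem.Str.len a)]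
    simp
  | succ k ih =>
    intro y acc hk hxy
    rw [PySem.List.pyRange_one_cons (by omega), ftExtend, dif_pos (by omega : y ≤ PySem.Str.len a)]
    simp only [List.foldl_cons]
    by_cases hin : PySem.Str.isIn (PySem.Str.slice a (some x) (some y)) b = true
    · rw [if_pos hin, if_pos hin, ih (y + 1) _ (by omega) (by omega)]
      simp
    · rw [if_neg hin, if_neg hin,
          fold_dead a b x y hx (by omega) (by simpa using hin) k (y + 1) acc (by omega) (by omega)]
      simp

-- ===== VERDICT (by name: the statement is the Claim_ definition above) =====
theorem findTokens_spec : Claim_equal_findTokens := by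
  intro inputA inputB isCaseSensative _
  unfold Spec_findTokens findTokens findTokens_alt
  apply PySem.List.foldl_congr_mem
  intro acc x hxmem
  have hx : 0 ≤ x := (PySem.List.mem_pyRange_one.mp hxmem).1
  exact inner_eq _ _ x hx _ (x + 1) acc rfl (by omega)
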